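-- pv_equiv track=rewrite | github.com/IBMSPadmin/spadmin | completer-poc/spadmin.py | regexpgenerator
-- ===== SOURCE A (Python) =====
-- def regexpgenerator( regexp ):
--
--     savelastchar = ''
--     if regexp[ -1 ] == '=':
--       savelastchar = regexp[ -1 ]
--       regexp = regexp[ : -1 ]
--
--     result = ''
--     for part in regexp.split():
--
--       if part[ 0 ].isupper():
--
--         tmpregexp = part
--         tmpstring = part
--         for x in part:
--           if tmpstring[ -1 ].isupper():
--             break
--           tmpstring = part[ 0 : len( tmpstring ) - 1 ]
--           tmpregexp += '|' + tmpstring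
--
--         result += '(' + tmpregexp + ')'
--
--       else:
--         result += '(' + part + ')'
--
--       result += '\s+'
--
--     return result[ :-3 ] + savelastchar
-- ===== SOURCE B (Python) =====
-- def _group(part):
--     if not part[0].isupper():
--         return '(' + part + ')'
--     alts = []
--     pref = ''
--     for ch in part:
--         pref += ch
--         if ch.isupper():
--             alts = []
--         alts.append(pref)
--     return '(' + '|'.join(reversed(alts)) + ')'
--
-- def regexpgenerator(regexp):
--     suffix = ''
--     if regexp.endswith('='):
--         suffix = '='
--         regexp = regexp[:-1]
--     return '\s+'.join(map(_group, regexp.split())) + suffix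
-- ===== Notes on version B (the rewrite author's own statement) =====
-- stated objective: alternative
-- what changed: Instead of A's backward repeated truncation (slice off one char at a time until the last char is uppercase) B makes a single forward pass per word, growing a prefix character by character and collecting it into the alternatives list, resetting that list whenever an uppercase character is seen, then reverses and joins; the outer += accumulator with [:-3] trim becomes a join over mapped groups.
-- crash fix: On the empty string A raises IndexError at regexp[-1]; B naturally returns the empty string. — e.g. on regexpgenerator(""): A raises IndexError, B returns ""
import Mathlib
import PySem

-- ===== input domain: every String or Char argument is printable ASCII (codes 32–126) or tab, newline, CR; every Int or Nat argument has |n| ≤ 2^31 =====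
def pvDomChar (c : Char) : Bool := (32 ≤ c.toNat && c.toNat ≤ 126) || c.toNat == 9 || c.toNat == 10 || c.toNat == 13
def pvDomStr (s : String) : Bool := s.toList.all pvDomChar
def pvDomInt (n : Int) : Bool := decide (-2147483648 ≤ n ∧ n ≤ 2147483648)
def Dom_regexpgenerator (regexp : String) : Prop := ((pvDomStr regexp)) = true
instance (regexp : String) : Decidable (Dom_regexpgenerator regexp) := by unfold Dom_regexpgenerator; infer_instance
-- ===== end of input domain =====

-- B replaces A's backward repeated-truncation inner loop by a single forward pass per
-- word (a prefix grown character by character, the alternatives list reset at each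
-- uppercase character, then reversed and joined), and A's '+='-accumulator with '[:-3]'
-- trim by a '\s+'.join over mapped groups.

-- ===== PORT A =====
-- inner 'for x in part' loop: state (tmpregexp, tmpstring); the 'none' branch of pyGet?
-- (empty tmpstring, a state Python never reaches for a split part) just returns.
def regexpAinner (part : String) : List Char → String → String → String
  | [], tmpregexp, _ => tmpregexp
  | _ :: xs, tmpregexp, tmpstring =>
    match PySem.Str.pyGet? tmpstring (-1) with
    | none => tmpregexp
    | some c =>
      if PySem.Chars.isupper c then tmpregexp
      else
        let tmpstring' := PySem.Str.slice part (some 0) (some (PySem.Str.len tmpstring - 1))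
        regexpAinner part xs (tmpregexp ++ "|" ++ tmpstring') tmpstring'

-- the 'savelastchar' prologue: regexp[-1] == '=' test, strip and save
def regexpAhead (regexp : String) : String × String :=
  match PySem.Str.pyGet? regexp (-1) with
  | some c =>
      if c = '=' then (String.ofList [c], PySem.Str.slice regexp none (some (-1)))
      else ("", regexp)
  | none => ("", regexp)   -- Python raises IndexError here; excluded by Pre_

def regexpgenerator (regexp : String) : String :=
  let p : String × String := regexpAhead regexp
  let savelastchar := p.1
  let regexp := p.2
  let result := (PySem.Str.split₀ regexp).foldl (fun result part =>
    (if PySem.Chars.isupper ((PySem.Str.pyGet? part 0).getD ' ')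
     then result ++ "(" ++ regexpAinner part part.toList part part ++ ")"
     else result ++ "(" ++ part ++ ")") ++ "\\s+") ""
  PySem.Str.slice result none (some (-3)) ++ savelastchar

-- ===== PORT B =====
-- B's forward pass: 'pref += ch; if ch.isupper(): alts = []; alts.append(pref)'
def regexpBalts : List Char → String → List String → List String
  | [], _, alts => alts
  | c :: cs, pref, alts =>
      let pref' := pref ++ c.toString
      regexpBalts cs pref' ((if PySem.Chars.isupper c then [] else alts) ++ [pref'])

def regexpBgroup (part : String) : String :=
  if PySem.Chars.isupper ((PySem.Str.pyGet? part 0).getD ' ') = false then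
    "(" ++ part ++ ")"
  else
    "(" ++ PySem.Str.join "|" (regexpBalts part.toList "" []).reverse ++ ")"

def regexpBhead (regexp : String) : String × String :=
  if PySem.Str.endswith regexp "=" then ("=", PySem.Str.slice regexp none (some (-1)))
  else ("", regexp)

def regexpgenerator_alt (regexp : String) : String :=
  let p : String × String := regexpBhead regexp
  PySem.Str.join "\\s+" ((PySem.Str.split₀ p.2).map regexpBgroup) ++ p.1

-- ===== PRECONDITION & SPEC =====
-- Pre_ excludes only the empty string, on which A raises IndexError at regexp[-1].
def Pre_regexpgenerator (regexp : String) : Prop := regexp ≠ ""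
instance (regexp : String) : Decidable (Pre_regexpgenerator regexp) := by
  unfold Pre_regexpgenerator; infer_instance
def pvWitness_regexpgenerator : String := "STGpool delete Abc8x ="

-- On the empty string A raises IndexError (regexp[-1]); B returns the empty string.
def Raises_regexpgenerator (regexp : String) : Prop := regexp = ""
instance (regexp : String) : Decidable (Raises_regexpgenerator regexp) := by
  unfold Raises_regexpgenerator; infer_instance
def pvRaiseWitness_regexpgenerator : String := ""
def pvRaiseWitnessOut_regexpgenerator : String := ""

def Spec_regexpgenerator (regexp : String) (out : String) : Prop := out = regexpgenerator_alt regexp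
instance (regexp : String) (out : String) : Decidable (Spec_regexpgenerator regexp out) := by
  unfold Spec_regexpgenerator; infer_instance

-- ===== CLAIM (what is proved, stated in full; the proofs are below) =====
def Claim_equal_regexpgenerator : Prop := ∀ (regexp : String), Dom_regexpgenerator regexp → Pre_regexpgenerator regexp → Spec_regexpgenerator regexp (regexpgenerator regexp)
def Claim_raises_regexpgenerator : Prop := (∀ (regexp : String), Dom_regexpgenerator regexp → Raises_regexpgenerator regexp → ¬ Pre_regexpgenerator regexp) ∧ (Dom_regexpgenerator (pvRaiseWitness_regexpgenerator) ∧ Raises_regexpgenerator (pvRaiseWitness_regexpgenerator) ∧ regexpgenerator_alt (pvRaiseWitness_regexpgenerator) = pvRaiseWitnessOut_regexpgenerator)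

-- ===== LEMMAS AND PROOFS =====

-- the '|'-separated tail of a part's group: alternatives of lengths m-1 down to i+1
def barsChars (cs : List Char) (i : Nat) : Nat → List Char
  | m => if _h : i + 1 < m then '|' :: (cs.take (m - 1) ++ barsChars cs i (m - 1)) else []
  decreasing_by omega

theorem barsChars_stop (cs : List Char) (i m : Nat) (h : ¬ i + 1 < m) :
    barsChars cs i m = [] := by rw [barsChars]; simp [h]

theorem barsChars_step (cs : List Char) (i m : Nat) (h : i + 1 < m) :
    barsChars cs i m = '|' :: (cs.take (m - 1) ++ barsChars cs i (m - 1)) := by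
  rw [barsChars]; simp [h]

theorem pyGet?_last (s : String) (m : Nat) (hm : 0 < m) (h : s.toList.length = m) :
    PySem.Str.pyGet? s (-1) = s.toList[m - 1]? := by
  simp [PySem.List.pyGet?, PySem.List.pyIdx?, h, show 1 ≤ m from hm]

-- A's inner loop, characterized: it appends '|'-alternatives down to the last uppercase index i
theorem regexpAinner_eq (part : String) (i : Nat)
    (hi : i < part.toList.length)
    (hupper : PySem.Chars.isupper (part.toList[i]'hi) = true)
    (hlast : ∀ j (hj : j < part.toList.length), i < j → PySem.Chars.isupper (part.toList[j]'hj) = false) :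
    ∀ (fuel : List Char) (R ts : String) (m : Nat),
      ts.toList = part.toList.take m → i < m → m ≤ part.toList.length →
      m - (i + 1) ≤ fuel.length →
      (regexpAinner part fuel R ts).toList = R.toList ++ barsChars part.toList i m := by
  intro fuel
  induction fuel with
  | nil =>
    intro R ts m hts him hmn hfuel
    simp only [regexpAinner]
    rw [barsChars_stop part.toList i m (by simp at hfuel; omega)]
    simp
  | cons c fs ih =>
    intro R ts m hts him hmn hfuel
    have hlen : ts.toList.length = m := by rw [hts, List.length_take]; exact Nat.min_eq_left hmn
    have hm0 : 0 < m := lt_of_le_of_lt (Nat.zero_le i) him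
    have hm1 : m - 1 < part.toList.length := lt_of_lt_of_le (Nat.sub_lt hm0 Nat.one_pos) hmn
    have hget : PySem.Str.pyGet? ts (-1) = some (part.toList[m - 1]'hm1) := by
      rw [pyGet?_last ts m (by omega) hlen, hts]
      rw [List.getElem?_take_of_lt (by omega)]
      simp
    simp only [regexpAinner, hget]
    by_cases hu : PySem.Chars.isupper (part.toList[m - 1]'hm1) = true
    · -- break: m - 1 must be i
      have : m = i + 1 := by
        by_contra hne
        have h2 : i < m - 1 := by omega
        exact absurd hu (by simp [hlast (m - 1) hm1 h2])
      rw [hu]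
      simp [barsChars_stop part.toList i m (by omega)]
    · have hne : (i : Nat) < m - 1 := by
        rcases Nat.lt_or_ge i (m - 1) with h | h
        · exact h
        · have heq : m - 1 = i := by omega
          simp only [heq] at hu
          exact absurd hupper hu
      rw [Bool.not_eq_true] at hu
      rw [hu]
      simp only [Bool.false_eq_true, if_false]
      have hlenS : ts.length = m := by rw [← hlen]; simp
      have hslice : (PySem.Str.slice part (some 0) (some (PySem.Str.len ts - 1))).toList
          = part.toList.take (m - 1) := by
        rw [PySem.Str.toList_slice]
        simp only [PySem.Chars.slice_eq_listSlice, PySem.List.slice_zero_start]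
        rw [show PySem.Str.len ts - 1 = ((m - 1 : Nat) : Int) from by
              simp [PySem.Str.len, hlenS]; omega,
          PySem.List.slice_to part.toList (by positivity)]
        simp
      rw [ih _ _ (m - 1) hslice hne (by omega) (by simp at hfuel ⊢; omega)]
      rw [barsChars_step part.toList i m (by omega)]
      simp only [String.toList_append, hslice]
      simp

-- ===== B-side characterization =====

-- state composition of B's forward pass
theorem balts_append (x y : List Char) (pref : String) (alts : List String) :
    regexpBalts (x ++ y) pref alts
      = regexpBalts y (pref ++ String.ofList x) (regexpBalts x pref alts) := by
  induction x generalizing pref alts with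
  | nil => simp [regexpBalts]
  | cons c x ih =>
    simp only [List.cons_append, regexpBalts]
    rw [ih]
    congr 1
    apply String.toList_inj.mp
    simp

-- proof-side: the ascending list of extensions of pref by successive prefixes of rest
def extPrefs (pref : String) : List Char → List String
  | [] => []
  | c :: cs => (pref ++ c.toString) :: extPrefs (pref ++ c.toString) cs

theorem balts_noUpper (rest : List Char)
    (h : ∀ c ∈ rest, PySem.Chars.isupper c = false) :
    ∀ (pref : String) (alts : List String),
      regexpBalts rest pref alts = alts ++ extPrefs pref rest := by
  induction rest with
  | nil => intro pref alts; simp [regexpBalts, extPrefs]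
  | cons c cs ih =>
    intro pref alts
    have hc : PySem.Chars.isupper c = false := h c (List.mem_cons_self ..)
    simp only [regexpBalts, hc, Bool.false_eq_true, if_false]
    rw [ih (fun d hd => h d (List.mem_cons_of_mem _ hd))]
    simp [extPrefs]

theorem extPrefs_concat (ys : List Char) (c : Char) :
    ∀ pref : String, extPrefs pref (ys ++ [c])
      = extPrefs pref ys ++ [pref ++ String.ofList (ys ++ [c])] := by
  induction ys with
  | nil =>
    intro pref
    simp only [List.nil_append, extPrefs]
    have : c.toString = String.ofList [c] := by apply String.toList_inj.mp; simp
    rw [this]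
  | cons d ys ih =>
    intro pref
    simp only [List.cons_append, extPrefs, ih]
    have : pref ++ d.toString ++ String.ofList (ys ++ [c])
        = pref ++ String.ofList (d :: (ys ++ [c])) := by
      apply String.toList_inj.mp; simp
    rw [this]

-- the descending list of prefixes of lengths m down to i+1
def descPref (cs : List Char) (i : Nat) : Nat → List (List Char)
  | m => if _h : i < m then cs.take m :: descPref cs i (m - 1) else []
  decreasing_by omega

theorem descPref_stop (cs : List Char) (i m : Nat) (h : ¬ i < m) :
    descPref cs i m = [] := by rw [descPref]; simp [h]

theorem descPref_step (cs : List Char) (i m : Nat) (h : i < m) :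
    descPref cs i m = cs.take m :: descPref cs i (m - 1) := by
  rw [descPref]; simp [h]

theorem join_descPref (cs : List Char) (i : Nat) : ∀ m, i < m →
    PySem.Chars.join ['|'] (descPref cs i m) = cs.take m ++ barsChars cs i m := by
  intro m
  induction m using Nat.strong_induction_on with
  | _ m ih =>
    intro him
    rw [descPref_step cs i m him]
    by_cases h : i + 1 < m
    · have h3 : i < m - 1 := by omega
      rw [descPref_step cs i (m - 1) h3, PySem.Chars.join_cons_cons,
        ← descPref_step cs i (m - 1) h3, ih (m - 1) (by omega) h3,
        barsChars_step cs i m h]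
      simp
    · rw [descPref_stop cs i (m - 1) (by omega), PySem.Chars.join_singleton,
        barsChars_stop cs i m h]
      simp

-- reversing B's collected alternatives yields the descending prefix list
theorem revExt (cs : List Char) (i : Nat) : ∀ m, i < m → m ≤ cs.length →
    ((String.ofList (cs.take (i + 1))
        :: extPrefs (String.ofList (cs.take (i + 1))) ((cs.take m).drop (i + 1))).map
      String.toList).reverse = descPref cs i m := by
  intro m
  induction m using Nat.strong_induction_on with
  | _ m ih =>
    intro him hmn
    obtain ⟨m, rfl⟩ : ∃ m', m = m' + 1 := ⟨m - 1, by omega⟩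
    by_cases h : i < m
    · have hm : m < cs.length := by omega
      have hsplit : cs.take (m + 1) = cs.take m ++ [cs[m]'hm] :=
        List.take_succ_eq_append_getElem hm
      have hdrop : (cs.take (m + 1)).drop (i + 1)
          = (cs.take m).drop (i + 1) ++ [cs[m]'hm] := by
        rw [hsplit, List.drop_append_of_le_length]
        rw [List.length_take]; omega
      rw [hdrop, extPrefs_concat]
      have htakeEq : String.ofList (cs.take (i + 1))
            ++ String.ofList ((cs.take m).drop (i + 1) ++ [cs[m]'hm])
          = String.ofList (cs.take (m + 1)) := by
        apply String.toList_inj.mp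
        simp only [String.toList_append, String.toList_ofList]
        rw [show cs.take (i + 1) = (cs.take m).take (i + 1) from by
              rw [List.take_take]; congr 1; omega,
          ← List.append_assoc, List.take_append_drop, ← hsplit]
      rw [show String.ofList (cs.take (i+1))
            :: (extPrefs (String.ofList (cs.take (i+1))) ((cs.take m).drop (i+1))
                ++ [String.ofList (cs.take (i+1))
                    ++ String.ofList ((cs.take m).drop (i+1) ++ [cs[m]'hm])])
          = (String.ofList (cs.take (i+1))
              :: extPrefs (String.ofList (cs.take (i+1))) ((cs.take m).drop (i+1)))
            ++ [String.ofList (cs.take (i+1))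
                ++ String.ofList ((cs.take m).drop (i+1) ++ [cs[m]'hm])] from by simp]
      rw [List.map_append, List.reverse_append, htakeEq]
      rw [ih m (by omega) h (by omega)]
      rw [descPref_step cs i (m + 1) him]
      simp
    · have hm : m = i := by omega
      subst hm
      rw [List.drop_eq_nil_of_le (by rw [List.length_take]; omega)]
      simp only [extPrefs, List.map_cons, List.map_nil, List.reverse_cons,
        List.reverse_nil, List.nil_append]
      rw [descPref_step cs m (m + 1) (by omega), show m + 1 - 1 = m from rfl,
        descPref_stop cs m m (by omega)]
      simp

theorem balts_upper_single (c : Char) (h : PySem.Chars.isupper c = true)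
    (pref : String) (alts : List String) :
    regexpBalts [c] pref alts = [pref ++ c.toString] := by
  simp [regexpBalts, h]

-- the two per-part group builders agree
theorem group_eq (part : String) :
    (if PySem.Chars.isupper ((PySem.Str.pyGet? part 0).getD ' ')
     then "(" ++ regexpAinner part part.toList part part ++ ")"
     else "(" ++ part ++ ")") = regexpBgroup part := by
  by_cases hcond : PySem.Chars.isupper ((PySem.Str.pyGet? part 0).getD ' ') = true
  · rw [if_pos hcond, regexpBgroup, if_neg (by rw [hcond]; simp)]
    -- part is nonempty with uppercase head
    have hne : part.toList ≠ [] := by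
      intro h
      rw [show PySem.Str.pyGet? part 0 = part.toList[(0:Nat)]? from by
            rw [show (0 : Int) = ((0 : Nat) : Int) from rfl, PySem.Str.pyGet?_natCast]] at hcond
      rw [h] at hcond
      simp at hcond
      exact absurd hcond (by decide)
    have hn0 : 0 < part.toList.length := List.length_pos_of_ne_nil hne
    have hP0 : PySem.Chars.isupper ((part.toList[0]?).getD ' ') = true := by
      rw [show PySem.Str.pyGet? part 0 = part.toList[(0:Nat)]? from by
            rw [show (0 : Int) = ((0 : Nat) : Int) from rfl, PySem.Str.pyGet?_natCast]] at hcond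
      exact hcond
    set n := part.toList.length with hn
    set P : Nat → Prop := fun j => PySem.Chars.isupper ((part.toList[j]?).getD ' ') = true with hPdef
    have hPi : P (Nat.findGreatest P (n - 1)) := Nat.findGreatest_spec (Nat.zero_le (n - 1)) hP0
    set i := Nat.findGreatest P (n - 1) with hidef
    have hi : i < n := lt_of_le_of_lt (Nat.findGreatest_le (n - 1)) (by omega)
    have hG : ∀ j, i < j → j < n → PySem.Chars.isupper ((part.toList[j]?).getD ' ') = false := by
      intro j hj hjn
      have := Nat.findGreatest_is_greatest (P := P) hj (by omega)
      rw [hPdef] at this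
      simpa using this
    have hupper : PySem.Chars.isupper (part.toList[i]'hi) = true := by
      have := hPi; rw [hPdef] at this
      simpa [List.getElem?_eq_getElem hi] using this
    -- A side
    have hA := regexpAinner_eq part i hi hupper
      (by intro j hj hij
          have := hG j hij hj
          simpa [List.getElem?_eq_getElem hj] using this)
      part.toList part part n (by rw [hn]; exact List.take_length.symm) hi le_rfl (by omega)
    -- B side
    set cs := part.toList with hcs
    have hBalts : regexpBalts cs "" []
        = String.ofList (cs.take (i + 1))
          :: extPrefs (String.ofList (cs.take (i + 1))) (cs.drop (i + 1)) := by
      conv_lhs => rw [show cs = cs.take (i + 1) ++ cs.drop (i + 1) from (List.take_append_drop ..).symm]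
      rw [balts_append]
      have hsplit1 : cs.take (i + 1) = cs.take i ++ [cs[i]'hi] :=
        List.take_succ_eq_append_getElem hi
      rw [show regexpBalts (cs.take (i + 1)) "" []
            = [String.ofList (cs.take (i + 1))] from by
        rw [hsplit1, balts_append, balts_upper_single _ hupper]
        congr 1
        apply String.toList_inj.mp
        simp
        exact hsplit1.symm]
      rw [balts_noUpper _ (by
        intro c hc
        obtain ⟨k, hk, hck⟩ := List.getElem_of_mem hc
        subst hck
        rw [List.getElem_drop]
        have hkn : i + 1 + k < n := by
          have := hk; rw [List.length_drop] at this; omega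
        have := hG (i + 1 + k) (by omega) hkn
        rw [List.getElem?_eq_getElem hkn] at this
        simpa using this)]
      rw [show ("" : String) ++ String.ofList (cs.take (i + 1)) = String.ofList (cs.take (i + 1)) from by
        apply String.toList_inj.mp; simp]
      rfl
    apply String.toList_inj.mp
    simp only [String.toList_append, hA]
    rw [PySem.Str.toList_join, hBalts, List.map_reverse]
    rw [show cs.drop (i + 1) = (cs.take n).drop (i + 1) from by rw [hn, List.take_length]]
    rw [revExt cs i n hi (by rw [hn])]
    rw [show ("|" : String).toList = ['|'] from rfl]
    rw [join_descPref cs i n hi]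
    rw [show cs.take n = cs from by rw [hn, List.take_length]]
  · rw [if_neg hcond, regexpBgroup, if_pos (by simpa using hcond)]

theorem toList_foldl_append (l : List String) (a : String) :
    (l.foldl (fun r s => r ++ s) a).toList = a.toList ++ (l.map String.toList).flatten := by
  induction l generalizing a with
  | nil => simp
  | cons x xs ih => simp [ih, List.append_assoc]

theorem toList_stringJoin (l : List String) :
    (String.join l).toList = (l.map String.toList).flatten := by
  have h := toList_foldl_append l ""
  simpa using h

theorem stringJoin_cons (x : String) (l : List String) :
    String.join (x :: l) = x ++ String.join l := by
  apply String.toList_inj.mp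
  simp [toList_stringJoin (x :: l), toList_stringJoin l]

-- A's '+='-loop over the parts, as a join of the mapped pieces
theorem foldl_body_eq (C : String → Bool) (X : String → String) (parts : List String) (a : String) :
    parts.foldl (fun result part =>
      (if C part then result ++ "(" ++ X part ++ ")" else result ++ "(" ++ part ++ ")") ++ "\\s+") a
    = a ++ String.join (parts.map (fun part =>
        (if C part then "(" ++ X part ++ ")" else "(" ++ part ++ ")") ++ "\\s+")) := by
  induction parts generalizing a with
  | nil => simp [String.join]
  | cons p ps ih =>
    simp only [List.foldl_cons, List.map_cons, ih, stringJoin_cons]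
    split_ifs <;> simp [String.append_assoc]

theorem flatten_sep (gs : List (List Char)) (sep : List Char) (h : gs ≠ []) :
    (gs.map (· ++ sep)).flatten = PySem.Chars.join sep gs ++ sep := by
  induction gs with
  | nil => exact absurd rfl h
  | cons g gs ih =>
    cases gs with
    | nil => simp [PySem.Chars.join_singleton]
    | cons g2 rest =>
      rw [List.map_cons, List.flatten_cons, ih (by simp), PySem.Chars.join_cons_cons]
      simp

-- the '[:-3]' trim of the accumulated result is exactly '\s+'.join
theorem sliceJoin (gs : List String) :
    PySem.Str.slice (String.join (gs.map (· ++ "\\s+"))) none (some (-3))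
      = PySem.Str.join "\\s+" gs := by
  apply String.toList_inj.mp
  rw [PySem.Str.toList_slice]
  simp only [PySem.Chars.slice_eq_listSlice]
  rw [PySem.List.slice_to_neg_ofNat _ 3 (by omega)]
  rw [toList_stringJoin, PySem.Str.toList_join]
  rw [List.map_map]
  have hmp : (String.toList ∘ fun g => g ++ "\\s+") =
      (fun g => g ++ ['\\', 's', '+']) ∘ String.toList := by
    funext g
    simp
  rw [hmp, ← List.map_map]
  cases hgs : gs.map String.toList with
  | nil => simp [PySem.Chars.join_nil]
  | cons g rest =>
    rw [flatten_sep (g :: rest) ['\\', 's', '+'] (by simp)]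
    rw [List.length_append]
    simp

-- the whole body after the '=' handling: fold + trim = map + join
theorem core_eq (r : String) :
    PySem.Str.slice ((PySem.Str.split₀ r).foldl (fun result part =>
      (if PySem.Chars.isupper ((PySem.Str.pyGet? part 0).getD ' ')
       then result ++ "(" ++ regexpAinner part part.toList part part ++ ")"
       else result ++ "(" ++ part ++ ")") ++ "\\s+") "") none (some (-3))
    = PySem.Str.join "\\s+" ((PySem.Str.split₀ r).map regexpBgroup) := by
  rw [foldl_body_eq]
  have hcg : ∀ p ∈ PySem.Str.split₀ r,
      (if PySem.Chars.isupper ((PySem.Str.pyGet? p 0).getD ' ')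
       then "(" ++ regexpAinner p p.toList p p ++ ")"
       else "(" ++ p ++ ")") ++ "\\s+" = regexpBgroup p ++ "\\s+" := by
    intro p _
    rw [group_eq]
  rw [List.map_congr_left hcg]
  rw [show (fun p => regexpBgroup p ++ "\\s+") = ((· ++ "\\s+") ∘ regexpBgroup) from rfl,
    ← List.map_map]
  rw [show ∀ t : String, ("" : String) ++ t = t from fun t => by simp]
  exact sliceJoin _

theorem head_eq (regexp : String) (h : regexp ≠ "") :
    regexpAhead regexp = regexpBhead regexp := by
  have hne : regexp.toList ≠ [] := by
    intro hh
    exact h (String.toList_inj.mp (by simpa using hh))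
  obtain ⟨ys, c, hys⟩ := (List.eq_nil_or_concat regexp.toList).resolve_left hne
  have hget : PySem.Str.pyGet? regexp (-1) = some c := by
    rw [pyGet?_last regexp (ys.length + 1) (by omega) (by rw [hys]; simp)]
    rw [hys]
    simp
  unfold regexpAhead regexpBhead
  rw [hget]
  dsimp only
  by_cases hc : c = '='
  · have hends : PySem.Str.endswith regexp "=" = true := by
      rw [show PySem.Str.endswith regexp "=" = PySem.Chars.endswith regexp.toList ("=" : String).toList
            from by simp]
      refine (PySem.Chars.endswith_iff _ _).mpr ?_
      rw [hys, hc, show ("=" : String).toList = ['='] from rfl, List.concat_eq_append]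
      exact List.suffix_append _ _
    rw [hends, if_pos hc, if_pos rfl, hc]
  · have hends : PySem.Str.endswith regexp "=" = false := by
      rw [show PySem.Str.endswith regexp "=" = PySem.Chars.endswith regexp.toList ("=" : String).toList
            from by simp]
      apply Bool.eq_false_iff.mpr
      intro habs
      have hsuf := (PySem.Chars.endswith_iff _ _).mp habs
      rw [hys] at hsuf
      obtain ⟨t, ht⟩ := hsuf
      apply hc
      have hlast := congrArg (List.getLast? ·) ht
      simpa using hlast.symm
    rw [hends, if_neg hc]
    simp

-- ===== VERDICT (by name: the statement is the Claim_ definition above) =====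
theorem regexpgenerator_spec : Claim_equal_regexpgenerator := by
  intro regexp _hdom hpre
  unfold Spec_regexpgenerator regexpgenerator regexpgenerator_alt
  rw [head_eq regexp hpre]
  generalize regexpBhead regexp = p
  obtain ⟨save, r⟩ := p
  dsimp only
  exact congrArg (· ++ save) (core_eq r)

@[simp]
theorem regexpgenerator_raises : Claim_raises_regexpgenerator := by
  unfold Claim_raises_regexpgenerator
  refine ⟨fun r _ h => ?_, by decide⟩
  rw [Raises_regexpgenerator] at h
  rw [h]
  simp [Pre_regexpgenerator]
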